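-- pv_equiv track=rewrite | github.com/mikhailolkhovskiy/made_2020_algo | 02/task_02_f.py | solve
-- ===== SOURCE A (Python) =====
-- def solve(n, nums):
--
--     if nums[0] > nums[-1]:
--         return -1, []
--
--     def can_cut(i, k, j):
--         return nums[i] > nums[k] < nums[j] or nums[i] < nums[k] > nums[j]
--
--     cuts_memo = {}
--     memo = {}
--
--     def cut(i, j):
--         if (i, j) in cuts_memo:
--             return cuts_memo[(i, j)]
--         if i + 1 == j:
--             return []
--         result = None
--         for k in range(i + 1, j):
--             if can_cut(i, k, j):
--                 cuts1 = cut(i, k)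
--                 if cuts1 is None:
--                     continue
--                 cuts2 = cut(k, j)
--                 if cuts2 is None:
--                     continue
--                 result = cuts1 + cuts2 + [k]
--                 break
--
--         cuts_memo[(i, j)] = result
--         return result
--
--     def search(i, j):
--         if (i, j) in memo:
--             return memo[(i, j)]
--         min_cut = n + 1
--         for k in range(i + 1, j):
--             if nums[i] <= nums[k] <= nums[j]:
--                 c1, cuts1 = search(i, k)
--                 c2, cuts2 = search(k, j)
--                 if c1 + c2 < min_cut:
--                     min_cut = c1 + c2
--                     result = c1 + c2, cuts1 + cuts2
--         if min_cut == n + 1: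
--             cuts = cut(i, j)
--             if cuts is None:
--                 result = n + 1, None
--             else:
--                 result = len(cuts), cuts
--         memo[(i, j)] = result
--         return result
--
--     c, cuts = search(0, n - 1)
--     if c == n + 1:
--         return -1, []
--     else:
--         return c, [x + 1 for x in cuts]
-- ===== SOURCE B (Python) =====
-- def solve(n, nums):
--     if nums[0] > nums[-1]:
--         return -1, []
--
--     # Bottom-up interval DP over a single combined table T[(i, j)] = (cut, (cost, cuts)):
--     # one fused ascending scan over k per interval computes both the first valid cut
--     # (A's cut() with break) and the first strict minimizer (A's search() loop) at once.
--     T = {}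
--     for L in range(1, n):
--         for i in range(0, n - L):
--             j = i + L
--             c = [] if L == 1 else None
--             best = n + 1
--             res = None
--             for k in range(i + 1, j):
--                 ck, (kc1, ks1) = T[(i, k)]
--                 cj, (kc2, ks2) = T[(k, j)]
--                 if c is None and ck is not None and cj is not None and \
--                         (nums[i] > nums[k] < nums[j] or nums[i] < nums[k] > nums[j]):
--                     c = ck + cj + [k]
--                 if nums[i] <= nums[k] <= nums[j] and kc1 + kc2 < best:
--                     best = kc1 + kc2
--                     res = (kc1 + kc2, ks1 + ks2)
--             if best == n + 1:
--                 res = (n + 1, None) if c is None else (len(c), c)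
--             T[(i, j)] = (c, res)
--     c, cuts = T.get((0, n - 1), (None, (n + 1, None)))[1]
--     if c == n + 1:
--         return -1, []
--     return c, [x + 1 for x in cuts]
-- ===== Notes on version B (the rewrite author's own statement) =====
-- stated objective: alternative
-- what changed: Replaced the two memoized top-down recursions (cut/search with separate dict memos) by a bottom-up iterative interval DP over one combined table, where a single fused ascending scan per interval computes both the first valid cut and the strict-< first minimizer in one pass.
import Mathlib
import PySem

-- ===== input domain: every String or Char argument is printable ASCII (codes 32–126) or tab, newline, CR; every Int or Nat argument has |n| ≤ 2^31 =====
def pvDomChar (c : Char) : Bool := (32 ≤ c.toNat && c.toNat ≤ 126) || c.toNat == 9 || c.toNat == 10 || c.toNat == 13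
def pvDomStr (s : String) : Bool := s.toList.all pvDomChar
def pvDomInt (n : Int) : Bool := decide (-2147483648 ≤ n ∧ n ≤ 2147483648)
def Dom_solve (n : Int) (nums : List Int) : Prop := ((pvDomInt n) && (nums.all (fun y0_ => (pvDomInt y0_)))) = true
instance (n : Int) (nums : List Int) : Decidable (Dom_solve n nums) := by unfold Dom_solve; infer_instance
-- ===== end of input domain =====

-- B replaces A's two memoized top-down recursions by a bottom-up interval DP over ONE combined
-- table, filled with a single fused per-interval scan that computes the cut entry and the
-- minimizer together (alternative decomposition, same results on Pre_).


-- nums[i]; the default never fires on inputs admitted by Pre_solve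
def pvIx (nums : List Int) (i : Int) : Int := PySem.List.pyGetD nums i 0

-- ===== PORT A =====
-- can_cut(i, k, j) of the Python source (A defines this helper; Source B inlines the condition)
def pvCanCut (nums : List Int) (i k j : Int) : Bool :=
  decide ((pvIx nums i > pvIx nums k ∧ pvIx nums k < pvIx nums j) ∨
          (pvIx nums i < pvIx nums k ∧ pvIx nums k > pvIx nums j))

abbrev CMemo := PySem.Dict (Int × Int) (Option (List Int))
abbrev SMemo := PySem.Dict (Int × Int) (Int × Option (List Int))

-- cut(i, j) with its memo dict threaded through; cutALoop is cut's `for k` loop (with break),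
-- taking the recursive call as `cutRec`. The Nat argument of cutA is fuel: a totality guard
-- only (any fuel above the interval length gives Python's values; solve passes enough).
def cutALoop (nums : List Int) (cutRec : Int → Int → CMemo → Option (List Int) × CMemo)
    (i j : Int) (ks : List Int) (cm : CMemo) : Option (List Int) × CMemo :=
  match ks with
  | [] => (none, cm)
  | k :: ks' =>
    if pvCanCut nums i k j then
      match cutRec i k cm with
      | (none, cm1) => cutALoop nums cutRec i j ks' cm1
      | (some c1, cm1) =>
        match cutRec k j cm1 with
        | (none, cm2) => cutALoop nums cutRec i j ks' cm2
        | (some c2, cm2) => (some (c1 ++ c2 ++ [k]), cm2)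
    else cutALoop nums cutRec i j ks' cm

def cutA (nums : List Int) : Nat → Int → Int → CMemo → Option (List Int) × CMemo
  | 0, _, _, cm => (none, cm) -- out of fuel: unreachable from solve
  | fuel + 1, i, j, cm =>
    match cm.get? (i, j) with
    | some v => (v, cm)
    | none =>
      if i + 1 = j then (some [], cm)
      else
        match cutALoop nums (cutA nums fuel) i j (PySem.List.pyRange (i+1) j 1) cm with
        | (res, cm') => (res, cm'.insert (i, j) res)

-- search(i, j) with both memo dicts threaded; searchALoop is search's `for k` loop.
-- The loop accumulator is (min_cut, result); `result` starts unassigned in Python, hence Option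
-- (Python never reads it unassigned: the final getD (0, none) is unreachable).
def searchALoop (n : Int) (nums : List Int)
    (searchRec : Int → Int → SMemo × CMemo → (Int × Option (List Int)) × SMemo × CMemo)
    (i j : Int) (ks : List Int) (acc : Int × Option (Int × Option (List Int)))
    (st : SMemo × CMemo) : (Int × Option (Int × Option (List Int))) × SMemo × CMemo :=
  match ks with
  | [] => (acc, st)
  | k :: ks' =>
    if pvIx nums i ≤ pvIx nums k ∧ pvIx nums k ≤ pvIx nums j then
      match searchRec i k st with
      | ((c1, s1), st1) =>
        match searchRec k j st1 with
        | ((c2, s2), st2) =>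
          if c1 + c2 < acc.1 then
            -- cuts1 + cuts2: s1/s2 are never none when this branch runs (Python would raise)
            searchALoop n nums searchRec i j ks'
              (c1 + c2, some (c1 + c2, some (s1.getD [] ++ s2.getD []))) st2
          else searchALoop n nums searchRec i j ks' acc st2
    else searchALoop n nums searchRec i j ks' acc st

def searchA (n : Int) (nums : List Int) :
    Nat → Int → Int → SMemo × CMemo → (Int × Option (List Int)) × SMemo × CMemo
  | 0, _, _, st => ((n + 1, none), st) -- out of fuel: unreachable from solve
  | fuel + 1, i, j, st =>
    match st.1.get? (i, j) with
    | some v => (v, st)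
    | none =>
      match searchALoop n nums (searchA n nums fuel) i j (PySem.List.pyRange (i+1) j 1)
          (n + 1, none) st with
      | ((minc, resOpt), (sm, cm)) =>
        if minc = n + 1 then
          match cutA nums (fuel + 1) i j cm with
          | (none, cm') => ((n + 1, none), (sm.insert (i, j) (n + 1, none), cm'))
          | (some cs, cm') =>
            (((cs.length : Int), some cs), (sm.insert (i, j) ((cs.length : Int), some cs), cm'))
        else
          match resOpt.getD (0, none) with
          | result => (result, (sm.insert (i, j) result, cm))

def solve (n : Int) (nums : List Int) : Int × List Int :=
  if pvIx nums 0 > pvIx nums (-1) then (-1, [])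
  else
    match searchA n nums ((n - 1).toNat + 1) 0 (n - 1) (PySem.Dict.empty, PySem.Dict.empty) with
    | ((c, cuts), _) =>
      if c = n + 1 then (-1, [])
      else (c, (cuts.getD []).map (fun x => x + 1))

-- ===== PORT B =====
-- one combined table: T[(i,j)] = (cut entry, search entry)
abbrev BTab := PySem.Dict (Int × Int) (Option (List Int) × (Int × Option (List Int)))

-- Source B's single fused `for k` scan: threads the cut accumulator `c` (first valid cut, kept
-- once set) and the minimizer accumulator `acc` through one pass over the combined table.
-- `.getD []` on the stored lists never fires where Python reads them (guarded by ≠ none / <).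
def bLoop (n : Int) (nums : List Int) (T : BTab) (i j : Int) : List Int →
    Option (List Int) → Int × Option (Int × Option (List Int)) →
    Option (List Int) × (Int × Option (Int × Option (List Int)))
  | [], c, acc => (c, acc)
  | k :: ks', c, acc =>
    let e1 := T.getD (i, k) (none, (0, none))
    let e2 := T.getD (k, j) (none, (0, none))
    let c' : Option (List Int) :=
      if c = none ∧ e1.1 ≠ none ∧ e2.1 ≠ none ∧
          ((pvIx nums i > pvIx nums k ∧ pvIx nums k < pvIx nums j) ∨
           (pvIx nums i < pvIx nums k ∧ pvIx nums k > pvIx nums j)) then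
        some (e1.1.getD [] ++ e2.1.getD [] ++ [k])
      else c
    if pvIx nums i ≤ pvIx nums k ∧ pvIx nums k ≤ pvIx nums j ∧ e1.2.1 + e2.2.1 < acc.1 then
      bLoop n nums T i j ks' c'
        (e1.2.1 + e2.2.1, some (e1.2.1 + e2.2.1, some (e1.2.2.getD [] ++ e2.2.2.getD [])))
    else bLoop n nums T i j ks' c' acc

-- body of Source B's inner `for i` loop: fill the (i, i+L) entry of the combined table
def bStep (n : Int) (nums : List Int) (L : Int) (T : BTab) (i : Int) : BTab :=
  let j := i + L
  match bLoop n nums T i j (PySem.List.pyRange (i+1) j 1)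
      (if L = 1 then some [] else none) (n + 1, none) with
  | (c, best, resOpt) =>
    T.insert (i, j)
      (c, if best = n + 1 then
            match c with
            | none => (n + 1, none)
            | some cs => ((cs.length : Int), some cs)
          else resOpt.getD (0, none))

def solve_alt (n : Int) (nums : List Int) : Int × List Int :=
  if pvIx nums 0 > pvIx nums (-1) then (-1, [])
  else
    match (((PySem.List.pyRange 1 n 1).foldl
        (fun T L => (PySem.List.pyRange 0 (n - L) 1).foldl (bStep n nums L) T)
        (PySem.Dict.empty : BTab)).getD (0, n - 1) (none, (n + 1, none))).2 with
    | (c, cuts) =>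
      if c = n + 1 then (-1, [])
      else (c, (cuts.getD []).map (fun x => x + 1))

-- ===== PRECONDITION & SPEC =====
-- Pre_solve excludes exactly the inputs where the Python A raises (IndexError/TypeError):
-- an empty list, or n ≥ 3 with n > len(nums) and nums[0] <= nums[-1] (then the recursion
-- reads nums[n-1] out of range); on every other input A returns normally.
def Pre_solve (n : Int) (nums : List Int) : Prop :=
  nums ≠ [] ∧ (n ≤ 2 ∨ n ≤ PySem.List.len nums ∨ pvIx nums 0 > pvIx nums (-1))
instance (n : Int) (nums : List Int) : Decidable (Pre_solve n nums) := by
  unfold Pre_solve; infer_instance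
def pvWitness_solve : Int × List Int := (4, [1, 3, 2, 4])
def Spec_solve (n : Int) (nums : List Int) (out : Int × List Int) : Prop := out = solve_alt n nums
instance (n : Int) (nums : List Int) (out : Int × List Int) : Decidable (Spec_solve n nums out) := by
  unfold Spec_solve; infer_instance

-- ===== CLAIM (what is proved, stated in full; the proofs are below) =====
def Claim_equal_solve : Prop := ∀ (n : Int) (nums : List Int), Dom_solve n nums → Pre_solve n nums → Spec_solve n nums (solve n nums)

-- ===== LEMMAS AND PROOFS =====

-- pure (memo-free) versions of cut and search: the common mathematical content of both ports
mutual
def cutF (nums : List Int) (i j : Int) : Option (List Int) :=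
  if i + 1 = j then some []
  else cutFLoop nums i j (PySem.List.pyRange (i+1) j 1)
  termination_by ((j - i).toNat, (PySem.List.pyRange (i+1) j 1).length + 1)
  decreasing_by all_goals simp [Prod.lex_iff, PySem.List.length_pyRange_one] <;> omega

def cutFLoop (nums : List Int) (i j : Int) (ks : List Int) : Option (List Int) :=
  match ks with
  | [] => none
  | k :: ks' =>
    if h : i < k ∧ k < j then
      if pvCanCut nums i k j then
        match cutF nums i k with
        | none => cutFLoop nums i j ks'
        | some c1 =>
          match cutF nums k j with
          | none => cutFLoop nums i j ks'
          | some c2 => some (c1 ++ c2 ++ [k])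
      else cutFLoop nums i j ks'
    else cutFLoop nums i j ks'
  termination_by ((j - i).toNat, ks.length)
  decreasing_by all_goals simp [Prod.lex_iff, PySem.List.length_pyRange_one] <;> omega
end

mutual
def searchF (n : Int) (nums : List Int) (i j : Int) : Int × Option (List Int) :=
  match searchFLoop n nums i j (PySem.List.pyRange (i+1) j 1) (n + 1, none) with
  | (minc, resOpt) =>
    if minc = n + 1 then
      match cutF nums i j with
      | none => (n + 1, none)
      | some cs => ((cs.length : Int), some cs)
    else resOpt.getD (0, none)
  termination_by ((j - i).toNat, (PySem.List.pyRange (i+1) j 1).length + 1)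
  decreasing_by all_goals simp [Prod.lex_iff, PySem.List.length_pyRange_one] <;> omega

def searchFLoop (n : Int) (nums : List Int) (i j : Int) (ks : List Int)
    (acc : Int × Option (Int × Option (List Int))) : Int × Option (Int × Option (List Int)) :=
  match ks with
  | [] => acc
  | k :: ks' =>
    if h : i < k ∧ k < j then
      if pvIx nums i ≤ pvIx nums k ∧ pvIx nums k ≤ pvIx nums j then
        match searchF n nums i k with
        | (c1, s1) =>
          match searchF n nums k j with
          | (c2, s2) =>
            if c1 + c2 < acc.1 then
              searchFLoop n nums i j ks' (c1 + c2, some (c1 + c2, some (s1.getD [] ++ s2.getD [])))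
            else searchFLoop n nums i j ks' acc
      else searchFLoop n nums i j ks' acc
    else searchFLoop n nums i j ks' acc
  termination_by ((j - i).toNat, ks.length)
  decreasing_by all_goals simp [Prod.lex_iff, PySem.List.length_pyRange_one] <;> omega
end

-- A-side: memo coherence
def CoherC (nums : List Int) (cm : CMemo) : Prop :=
  ∀ p v, cm.get? p = some v → v = cutF nums p.1 p.2
def CoherS (n : Int) (nums : List Int) (sm : SMemo) : Prop :=
  ∀ p v, sm.get? p = some v → v = searchF n nums p.1 p.2

theorem cutA_eq (nums : List Int) : ∀ (f : Nat) (i j : Int) (cm : CMemo),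
    (j - i).toNat < f → CoherC nums cm →
    (cutA nums f i j cm).1 = cutF nums i j ∧ CoherC nums (cutA nums f i j cm).2 := by
  intro f
  induction f with
  | zero => intro i j cm hd _; exact absurd hd (by omega)
  | succ f ihf =>
    intro i j cm hd hco
    rw [cutA]
    cases hget : cm.get? (i, j) with
    | some v => exact ⟨hco _ _ hget, hco⟩
    | none =>
      by_cases hij : i + 1 = j
      · simp only [if_pos hij]
        rw [cutF]; simp only [if_pos hij]
        exact ⟨by trivial, hco⟩
      · simp only [if_neg hij]
        have hloop : ∀ (ks : List Int), (∀ k ∈ ks, i < k ∧ k < j) → ∀ (cm : CMemo),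
            CoherC nums cm →
            (cutALoop nums (cutA nums f) i j ks cm).1 = cutFLoop nums i j ks ∧
              CoherC nums (cutALoop nums (cutA nums f) i j ks cm).2 := by
          intro ks
          induction ks with
          | nil => intro _ cm hco; rw [cutALoop, cutFLoop]; exact ⟨by trivial, hco⟩
          | cons k ks' ihks =>
            intro hmem cm hco
            have hk := hmem k (List.mem_cons_self)
            have hrec := ihks (fun x hx => hmem x (List.mem_cons_of_mem _ hx))
            rw [cutALoop, cutFLoop]
            rw [dif_pos hk]
            by_cases hcc : pvCanCut nums i k j
            · simp only [if_pos hcc]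
              have h1 := ihf i k cm (by omega) hco
              rcases hc1 : cutA nums f i k cm with ⟨r1, cm1⟩
              rw [hc1] at h1
              rw [← h1.1]
              cases r1 with
              | none => dsimp only; exact hrec cm1 h1.2
              | some c1 =>
                dsimp only
                have h2 := ihf k j cm1 (by omega) h1.2
                rcases hc2 : cutA nums f k j cm1 with ⟨r2, cm2⟩
                rw [hc2] at h2
                rw [← h2.1]
                cases r2 with
                | none => dsimp only; exact hrec cm2 h2.2
                | some c2 => dsimp only; exact ⟨rfl, h2.2⟩
            · simp only [if_neg hcc]; exact hrec cm hco
        have hl := hloop (PySem.List.pyRange (i+1) j 1)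
          (fun k hk => by have := (PySem.List.mem_pyRange_one).1 hk; omega) cm hco
        rcases hcl : cutALoop nums (cutA nums f) i j (PySem.List.pyRange (i+1) j 1) cm
          with ⟨res, cm'⟩
        rw [hcl] at hl
        have hres : res = cutF nums i j := by
          rw [cutF]; simp only [if_neg hij]; exact hl.1
        refine ⟨hres, ?_⟩
        intro p v hv
        rw [PySem.Dict.get?_insert] at hv
        by_cases hp : p = (i, j)
        · rw [if_pos hp] at hv
          cases hv; rw [hp, hres]
        · rw [if_neg hp] at hv
          exact hl.2 p v hv

theorem searchA_eq (n : Int) (nums : List Int) : ∀ (f : Nat) (i j : Int) (st : SMemo × CMemo),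
    (j - i).toNat < f → CoherS n nums st.1 → CoherC nums st.2 →
    (searchA n nums f i j st).1 = searchF n nums i j ∧
      CoherS n nums (searchA n nums f i j st).2.1 ∧
      CoherC nums (searchA n nums f i j st).2.2 := by
  intro f
  induction f with
  | zero => intro i j st hd _ _; exact absurd hd (by omega)
  | succ f ihf =>
    intro i j st hd hcoS hcoC
    rw [searchA]
    cases hget : st.1.get? (i, j) with
    | some v => exact ⟨hcoS _ _ hget, hcoS, hcoC⟩
    | none =>
      have hloop : ∀ (ks : List Int), (∀ k ∈ ks, i < k ∧ k < j) →
          ∀ (acc : Int × Option (Int × Option (List Int))) (st : SMemo × CMemo),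
          CoherS n nums st.1 → CoherC nums st.2 →
          (searchALoop n nums (searchA n nums f) i j ks acc st).1
              = searchFLoop n nums i j ks acc ∧
            CoherS n nums (searchALoop n nums (searchA n nums f) i j ks acc st).2.1 ∧
            CoherC nums (searchALoop n nums (searchA n nums f) i j ks acc st).2.2 := by
        intro ks
        induction ks with
        | nil => intro _ acc st h1 h2; rw [searchALoop, searchFLoop]; exact ⟨by trivial, h1, h2⟩
        | cons k ks' ihks =>
          intro hmem acc st h1 h2
          have hk := hmem k (List.mem_cons_self)
          have hrec := ihks (fun x hx => hmem x (List.mem_cons_of_mem _ hx))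
          rw [searchALoop, searchFLoop]
          rw [dif_pos hk]
          by_cases hcond : pvIx nums i ≤ pvIx nums k ∧ pvIx nums k ≤ pvIx nums j
          · simp only [if_pos hcond]
            have g1 := ihf i k st (by omega) h1 h2
            rcases hs1 : searchA n nums f i k st with ⟨⟨c1, s1⟩, st1⟩
            rw [hs1] at g1
            dsimp only at g1
            have g2 := ihf k j st1 (by omega) g1.2.1 g1.2.2
            rcases hs2 : searchA n nums f k j st1 with ⟨⟨c2, s2⟩, st2⟩
            rw [hs2] at g2
            dsimp only at g2
            rw [← g1.1, ← g2.1]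
            dsimp only
            by_cases hlt : c1 + c2 < acc.1
            · simp only [if_pos hlt]; exact hrec _ st2 g2.2.1 g2.2.2
            · simp only [if_neg hlt]; exact hrec _ st2 g2.2.1 g2.2.2
          · simp only [if_neg hcond]; exact hrec _ st h1 h2
      have hl := hloop (PySem.List.pyRange (i+1) j 1)
        (fun k hk => by have := (PySem.List.mem_pyRange_one).1 hk; omega)
        (n + 1, none) st hcoS hcoC
      rcases hsl : searchALoop n nums (searchA n nums f) i j (PySem.List.pyRange (i+1) j 1)
          (n + 1, none) st with ⟨⟨minc, resOpt⟩, sm, cm⟩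
      rw [hsl] at hl
      dsimp only at hl
      have hFl : searchFLoop n nums i j (PySem.List.pyRange (i+1) j 1) (n + 1, none)
          = (minc, resOpt) := hl.1.symm
      by_cases hm : minc = n + 1
      · simp only [if_pos hm]
        have hc := cutA_eq nums (f + 1) i j cm (by omega) hl.2.2
        rcases hca : cutA nums (f + 1) i j cm with ⟨r, cm'⟩
        rw [hca] at hc
        dsimp only at hc
        cases r with
        | none =>
          have hsf : searchF n nums i j = ((n : Int) + 1, (none : Option (List Int))) := by
            rw [searchF, hFl]
            dsimp only
            rw [if_pos hm, ← hc.1]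
          dsimp only
          refine ⟨hsf.symm, ?_, hc.2⟩
          intro p v hv
          rw [PySem.Dict.get?_insert] at hv
          by_cases hp : p = (i, j)
          · rw [if_pos hp] at hv; cases hv; rw [hp, hsf]
          · rw [if_neg hp] at hv; exact hl.2.1 p v hv
        | some cs =>
          have hsf : searchF n nums i j = ((cs.length : Int), some cs) := by
            rw [searchF, hFl]
            dsimp only
            rw [if_pos hm, ← hc.1]
          dsimp only
          refine ⟨hsf.symm, ?_, hc.2⟩
          intro p v hv
          rw [PySem.Dict.get?_insert] at hv
          by_cases hp : p = (i, j)
          · rw [if_pos hp] at hv; cases hv; rw [hp, hsf]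
          · rw [if_neg hp] at hv; exact hl.2.1 p v hv
      · simp only [if_neg hm]
        have hsf : searchF n nums i j = resOpt.getD (0, none) := by
          rw [searchF, hFl]
          dsimp only
          rw [if_neg hm]
        refine ⟨hsf.symm, ?_, hl.2.2⟩
        intro p v hv
        rw [PySem.Dict.get?_insert] at hv
        by_cases hp : p = (i, j)
        · rw [if_pos hp] at hv; cases hv; rw [hp, hsf]
        · rw [if_neg hp] at hv; exact hl.2.1 p v hv

-- B-side: combined-table invariant
def TabInv (n : Int) (nums : List Int) (P : Int → Int → Prop) (T : BTab) : Prop :=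
  ∀ a b : Int, 0 ≤ a → a < b → b ≤ n - 1 → P a b →
    T.get? (a, b) = some (cutF nums a b, searchF n nums a b)

theorem tabInv_mono (n : Int) (nums : List Int) (P Q : Int → Int → Prop) (T : BTab)
    (h : TabInv n nums P T)
    (hpq : ∀ a b : Int, 0 ≤ a → a < b → b ≤ n - 1 → Q a b → P a b) : TabInv n nums Q T :=
  fun a b h0 h1 h2 hq => h a b h0 h1 h2 (hpq a b h0 h1 h2 hq)

-- the fused scan computes in one pass what the two pure loops compute separately:
-- first component = the cut accumulator (set once, = cutFLoop when it starts unset),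
-- second component = searchFLoop.
theorem bLoop_eq (n : Int) (nums : List Int) (T : BTab) (i j : Int)
    (hT : ∀ k : Int, i < k → k < j →
      T.getD (i, k) (none, (0, none)) = (cutF nums i k, searchF n nums i k) ∧
        T.getD (k, j) (none, (0, none)) = (cutF nums k j, searchF n nums k j)) :
    ∀ (ks : List Int) (c : Option (List Int)) (acc : Int × Option (Int × Option (List Int))),
      (∀ k ∈ ks, i < k ∧ k < j) →
      bLoop n nums T i j ks c acc =
        ((match c with | some cs => some cs | none => cutFLoop nums i j ks),
          searchFLoop n nums i j ks acc) := by
  intro ks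
  induction ks with
  | nil =>
    intro c acc _
    rw [bLoop, searchFLoop]
    cases c <;> simp [cutFLoop]
  | cons k ks' ihks =>
    intro c acc hmem
    have hk := hmem k (List.mem_cons_self)
    have hrec := fun c' acc' => ihks c' acc' (fun x hx => hmem x (List.mem_cons_of_mem _ hx))
    rw [bLoop, searchFLoop, dif_pos hk]
    rw [(hT k hk.1 hk.2).1, (hT k hk.1 hk.2).2]
    rcases hs1 : searchF n nums i k with ⟨kc1, ks1⟩
    rcases hs2 : searchF n nums k j with ⟨kc2, ks2⟩
    dsimp only
    by_cases hm : pvIx nums i ≤ pvIx nums k ∧ pvIx nums k ≤ pvIx nums j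
    · by_cases hl : kc1 + kc2 < acc.1
      · rw [if_pos ⟨hm.1, hm.2, hl⟩, if_pos hm, if_pos hl, hrec]
        congr 1
        rcases c with _ | cs <;>
          by_cases hprop : ((pvIx nums i > pvIx nums k ∧ pvIx nums k < pvIx nums j) ∨
            (pvIx nums i < pvIx nums k ∧ pvIx nums k > pvIx nums j)) <;>
          rcases hci : cutF nums i k with _ | c1 <;>
          rcases hcj : cutF nums k j with _ | c2 <;>
          simp_all [cutFLoop, pvCanCut] <;> (try (split_ifs with hx)) <;> simp_all
      · rw [if_neg (fun h => hl h.2.2), if_pos hm, if_neg hl, hrec]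
        congr 1
        rcases c with _ | cs <;>
          by_cases hprop : ((pvIx nums i > pvIx nums k ∧ pvIx nums k < pvIx nums j) ∨
            (pvIx nums i < pvIx nums k ∧ pvIx nums k > pvIx nums j)) <;>
          rcases hci : cutF nums i k with _ | c1 <;>
          rcases hcj : cutF nums k j with _ | c2 <;>
          simp_all [cutFLoop, pvCanCut] <;> (try (split_ifs with hx)) <;> simp_all
    · rw [if_neg (fun h => hm ⟨h.1, h.2.1⟩), if_neg hm, hrec]
      congr 1
      rcases c with _ | cs <;>
        by_cases hprop : ((pvIx nums i > pvIx nums k ∧ pvIx nums k < pvIx nums j) ∨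
          (pvIx nums i < pvIx nums k ∧ pvIx nums k > pvIx nums j)) <;>
        rcases hci : cutF nums i k with _ | c1 <;>
        rcases hcj : cutF nums k j with _ | c2 <;>
        simp_all [cutFLoop, pvCanCut] <;> (try (split_ifs with hx)) <;> simp_all

theorem bStep_inv (n : Int) (nums : List Int) (L i : Int) (T : BTab)
    (hL : 1 ≤ L) (hi : 0 ≤ i) (hij : i + L ≤ n - 1)
    (hinv : TabInv n nums (fun a b => b - a < L ∨ (b - a = L ∧ a < i)) T) :
    TabInv n nums (fun a b => b - a < L ∨ (b - a = L ∧ a < i + 1)) (bStep n nums L T i) := by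
  have hT : ∀ k : Int, i < k → k < i + L →
      T.getD (i, k) (none, (0, none)) = (cutF nums i k, searchF n nums i k) ∧
        T.getD (k, i + L) (none, (0, none)) = (cutF nums k (i + L), searchF n nums k (i + L)) := by
    intro k hik hkj
    constructor
    · have h := hinv i k hi hik (by omega) (by omega)
      rw [PySem.Dict.getD_eq_get?_getD, h]; rfl
    · have h := hinv k (i + L) (by omega) (by omega) (by omega) (by omega)
      rw [PySem.Dict.getD_eq_get?_getD, h]; rfl
  have hbl := bLoop_eq n nums T i (i + L) hT (PySem.List.pyRange (i+1) (i + L) 1)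
    (if L = 1 then some [] else none) (n + 1, none)
    (fun k hkmem => by have := (PySem.List.mem_pyRange_one).1 hkmem; omega)
  have hcutv : (match (if L = 1 then (some [] : Option (List Int)) else none) with
      | some cs => some cs
      | none => cutFLoop nums i (i + L) (PySem.List.pyRange (i+1) (i + L) 1))
      = cutF nums i (i + L) := by
    by_cases hL1 : L = 1
    · rw [if_pos hL1, cutF, if_pos (by omega)]
    · rw [if_neg hL1, cutF, if_neg (by omega)]
  rw [bStep]
  dsimp only
  rw [hbl, hcutv]
  rcases hFl : searchFLoop n nums i (i + L) (PySem.List.pyRange (i+1) (i + L) 1) (n + 1, none)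
    with ⟨best, resOpt⟩
  dsimp only
  have hsval : (if best = n + 1 then
      (match cutF nums i (i + L) with
       | none => ((n : Int) + 1, (none : Option (List Int)))
       | some cs => ((cs.length : Int), some cs))
      else resOpt.getD (0, none)) = searchF n nums i (i + L) := by
    rw [searchF, hFl]
  intro a b ha hab hb hP
  by_cases hab' : (a, b) = (i, i + L)
  · have ha' : a = i := (Prod.mk.injEq _ _ _ _ ▸ hab').1
    have hb' : b = i + L := (Prod.mk.injEq _ _ _ _ ▸ hab').2
    subst ha'; subst hb'
    rw [PySem.Dict.get?_insert, if_pos rfl, hsval]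
  · have hold := hinv a b ha hab hb (by
      rcases hP with h | ⟨h1, h2⟩
      · exact Or.inl h
      · refine Or.inr ⟨h1, ?_⟩
        by_contra hcon
        exact hab' (by
          have : a = i := by omega
          have : b = i + L := by omega
          simp_all))
    rw [PySem.Dict.get?_insert, if_neg hab']
    exact hold

theorem rowFill (n : Int) (nums : List Int) (L : Int) (hL : 1 ≤ L) :
    ∀ (fuel : Nat) (lo : Int) (T : BTab), (n - L - lo).toNat ≤ fuel → 0 ≤ lo →
      TabInv n nums (fun a b => b - a < L ∨ (b - a = L ∧ a < lo)) T →
      TabInv n nums (fun a b => b - a < L ∨ (b - a = L ∧ a < n - L))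
        ((PySem.List.pyRange lo (n - L) 1).foldl (bStep n nums L) T) := by
  intro fuel
  induction fuel with
  | zero =>
    intro lo T hf h0 hinv
    rw [PySem.List.pyRange_one_eq_nil (by omega)]
    exact tabInv_mono n nums _ _ T hinv (fun a b _ _ _ hq => by omega)
  | succ f ihf =>
    intro lo T hf h0 hinv
    by_cases hlo : lo < n - L
    · rw [PySem.List.pyRange_one_cons hlo, List.foldl_cons]
      exact ihf (lo + 1) _ (by omega) (by omega)
        (bStep_inv n nums L lo T hL h0 (by omega) hinv)
    · rw [PySem.List.pyRange_one_eq_nil (by omega)]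
      exact tabInv_mono n nums _ _ T hinv (fun a b _ _ _ hq => by omega)

theorem allFill (n : Int) (nums : List Int) :
    ∀ (fuel : Nat) (L0 : Int) (T : BTab), (n - L0).toNat ≤ fuel → 1 ≤ L0 →
      TabInv n nums (fun a b => b - a < L0) T →
      TabInv n nums (fun a b => b - a ≤ n - 1)
        ((PySem.List.pyRange L0 n 1).foldl
          (fun T L => (PySem.List.pyRange 0 (n - L) 1).foldl (bStep n nums L) T) T) := by
  intro fuel
  induction fuel with
  | zero =>
    intro L0 T hf h1 hinv
    rw [PySem.List.pyRange_one_eq_nil (by omega)]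
    exact tabInv_mono n nums _ _ T hinv (fun a b ha hab hb hq => by omega)
  | succ f ihf =>
    intro L0 T hf h1 hinv
    by_cases hlt : L0 < n
    · rw [PySem.List.pyRange_one_cons hlt, List.foldl_cons]
      have hrow := rowFill n nums L0 h1 (n - L0 - 0).toNat 0 T (le_refl _) (le_refl _)
        (tabInv_mono n nums _ _ T hinv (fun a b ha hab hb hq => by omega))
      exact ihf (L0 + 1) _ (by omega) (by omega)
        (tabInv_mono n nums _ _ _ hrow (fun a b ha hab hb hq => by omega))
    · rw [PySem.List.pyRange_one_eq_nil (by omega)]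
      exact tabInv_mono n nums _ _ T hinv (fun a b ha hab hb hq => by omega)

theorem final_eq (n : Int) (nums : List Int) :
    (((PySem.List.pyRange 1 n 1).foldl
        (fun T L => (PySem.List.pyRange 0 (n - L) 1).foldl (bStep n nums L) T)
        (PySem.Dict.empty : BTab)).getD (0, n - 1) (none, (n + 1, none))).2
      = searchF n nums 0 (n - 1) := by
  by_cases hn : 2 ≤ n
  · have h0 : TabInv n nums (fun a b => b - a < 1) (PySem.Dict.empty : BTab) := by
      intro a b ha hab hb hq; omega
    have h := allFill n nums (n - 1).toNat 1 PySem.Dict.empty (by omega) (le_refl _) h0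
    have h2 := h 0 (n - 1) (by omega) (by omega) (le_refl _) (by omega)
    rw [PySem.Dict.getD_eq_get?_getD, h2]
    rfl
  · have hsf : searchF n nums 0 (n - 1) = (n + 1, none) := by
      rw [searchF, PySem.List.pyRange_one_eq_nil (by omega), searchFLoop]
      dsimp only
      rw [if_pos rfl, cutF, if_neg (by omega), PySem.List.pyRange_one_eq_nil (by omega), cutFLoop]
    rw [PySem.List.pyRange_one_eq_nil (by omega), List.foldl_nil, PySem.Dict.getD_empty, hsf]

-- ===== VERDICT (by name: the statement is the Claim_ definition above) =====
theorem solve_spec : Claim_equal_solve := by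
  intro n nums _ _
  unfold Spec_solve solve solve_alt
  by_cases hg : pvIx nums 0 > pvIx nums (-1)
  · simp [hg]
  · simp only [if_neg hg]
    have hA := (searchA_eq n nums ((n - 1).toNat + 1) 0 (n - 1)
      (PySem.Dict.empty, PySem.Dict.empty) (by omega)
      (by intro p v h; simp [PySem.Dict.get?_empty] at h)
      (by intro p v h; simp [PySem.Dict.get?_empty] at h)).1
    have hB := final_eq n nums
    rcases hsa : searchA n nums ((n - 1).toNat + 1) 0 (n - 1) (PySem.Dict.empty, PySem.Dict.empty)
      with ⟨⟨c, cuts⟩, st⟩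
    rw [hsa] at hA; simp at hA
    simp only [hB]
    rw [← hA]
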